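-- pv_equiv track=rewrite | github.com/aibaellord/BaelTheLordOfAll-AI | core/bypass/universal_bypass_protocol.py | _double_encode_bypass
-- ===== SOURCE A (Python) =====
-- def _double_encode_bypass(payload: str) -> str:
--     """Double URL encode bypass."""
--     result = ""
--     for char in payload:
--         if char.isalpha():
--             result += f"%25{ord(char):02X}"
--         else:
--             result += char
--     return result
-- ===== SOURCE B (Python) =====
-- def _double_encode_bypass(payload: str) -> str:
--     """Double URL encode bypass."""
--     table = {ord(c): f"%25{ord(c):02X}" for c in set(payload) if c.isalpha()}
--     return payload.translate(table)
-- ===== Notes on version B (the rewrite author's own statement) =====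
-- stated objective: faster
-- what changed: Replaces the per-character if/else string-concatenation loop by a translation table precomputed over the distinct characters of the input, applied with str.translate in one internal pass.
import Mathlib
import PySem

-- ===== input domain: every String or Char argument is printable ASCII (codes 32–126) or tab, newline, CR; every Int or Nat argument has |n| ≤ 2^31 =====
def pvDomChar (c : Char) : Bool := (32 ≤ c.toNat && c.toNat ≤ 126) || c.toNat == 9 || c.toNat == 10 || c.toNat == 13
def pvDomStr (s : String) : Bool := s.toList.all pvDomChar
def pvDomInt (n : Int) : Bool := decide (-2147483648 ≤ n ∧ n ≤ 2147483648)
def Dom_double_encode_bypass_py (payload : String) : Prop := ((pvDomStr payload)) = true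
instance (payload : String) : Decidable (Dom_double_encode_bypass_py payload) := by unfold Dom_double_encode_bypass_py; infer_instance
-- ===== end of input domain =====

-- B replaces A's per-character if/else concatenation loop by a translation table built over the
-- distinct characters of the input and applied in one pass (idiomatic str.translate form).

-- shared format primitive: f"{n:02X}" for 0 ≤ n < 256 (exact on the ASCII domain, where n ≤ 126)
def pvHexDigit (m : Nat) : Char := if m < 10 then Char.ofNat (48 + m) else Char.ofNat (55 + m)
def pvHex2 (n : Nat) : List Char := [pvHexDigit (n / 16), pvHexDigit (n % 16)]

-- ===== PORT A =====
def double_encode_bypass_py (payload : String) : String :=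
  String.ofList (payload.toList.foldl
    (fun result c =>
      if PySem.Chars.isalpha c then
        result ++ ('%' :: '2' :: '5' :: pvHex2 c.toNat)
      else
        result ++ [c])
    [])

-- ===== PORT B =====
-- the dict value for key ord(c): f"%25{ord(c):02X}"
def pvEnc (n : Nat) : String := String.ofList ('%' :: '2' :: '5' :: pvHex2 n)

-- the table comprehension over set(payload); its get? result is independent of set order
def pvTable (payload : String) : PySem.Dict Nat String :=
  (PySem.Set.ofList payload.toList).foldl
    (fun d c => if PySem.Chars.isalpha c then d.insert c.toNat (pvEnc c.toNat) else d)
    PySem.Dict.empty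

-- payload.translate(table): chars with a table entry are replaced, others kept
def double_encode_bypass_py_alt (payload : String) : String :=
  let table := pvTable payload
  String.ofList (payload.toList.flatMap (fun c =>
    match table.get? c.toNat with
    | some s => s.toList
    | none => [c]))

-- ===== PRECONDITION & SPEC =====
def Spec_double_encode_bypass_py (payload : String) (out : String) : Prop := out = double_encode_bypass_py_alt payload
instance (payload : String) (out : String) : Decidable (Spec_double_encode_bypass_py payload out) := by unfold Spec_double_encode_bypass_py; infer_instance

-- ===== CLAIM (what is proved, stated in full; the proofs are below) =====
def Claim_equal_double_encode_bypass_py : Prop := ∀ (payload : String), Dom_double_encode_bypass_py payload → Spec_double_encode_bypass_py payload (double_encode_bypass_py payload)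

-- ===== LEMMAS AND PROOFS =====

theorem pv_char_toNat_inj {a c : Char} (h : a.toNat = c.toNat) : a = c := by
  apply Char.ext; unfold Char.toNat at h; exact UInt32.toNat_inj.mp h

-- lookup in the dict built by the comprehension loop
theorem pvTable_fold_get (as : List Char) (d : PySem.Dict Nat String) (c : Char) :
    (as.foldl (fun d c => if PySem.Chars.isalpha c then d.insert c.toNat (pvEnc c.toNat) else d) d).get? c.toNat =
      if as.any (fun c' => PySem.Chars.isalpha c' && c' == c) then some (pvEnc c.toNat)
      else d.get? c.toNat := by
  induction as generalizing d with
  | nil => simp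
  | cons a as ih =>
    simp only [List.foldl_cons, ih, List.any_cons]
    by_cases ha : PySem.Chars.isalpha a
    · by_cases hac : a = c
      · subst hac
        simp [ha, PySem.Dict.get?_insert_self]
      · have hne : c.toNat ≠ a.toNat := fun h => hac (pv_char_toNat_inj h).symm
        simp [ha, hac, PySem.Dict.get?_insert_of_ne _ _ hne]
    · simp [ha]

theorem pvTable_get (payload : String) (c : Char) (hc : c ∈ payload.toList) :
    (pvTable payload).get? c.toNat =
      if PySem.Chars.isalpha c then some (pvEnc c.toNat) else none := by
  unfold pvTable
  rw [pvTable_fold_get]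
  by_cases ha : PySem.Chars.isalpha c
  · have : (PySem.Set.ofList payload.toList).any (fun c' => PySem.Chars.isalpha c' && c' == c) = true := by
      rw [List.any_eq_true]
      exact ⟨c, (PySem.Set.mem_ofList _ _).mpr hc, by simp [ha]⟩
    simp [this, ha]
  · have : (PySem.Set.ofList payload.toList).any (fun c' => PySem.Chars.isalpha c' && c' == c) = false := by
      rw [List.any_eq_false]
      intro c' _ h
      simp only [Bool.and_eq_true, beq_iff_eq] at h
      exact ha (h.2 ▸ h.1)
    simp [this, ha, PySem.Dict.get?_empty]

-- ===== VERDICT (by name: the statement is the Claim_ definition above) =====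
theorem double_encode_bypass_py_spec : Claim_equal_double_encode_bypass_py := by
  intro payload _
  unfold Spec_double_encode_bypass_py double_encode_bypass_py double_encode_bypass_py_alt
  have hfold :
      (fun (result : List Char) (c : Char) =>
        if PySem.Chars.isalpha c then result ++ ('%' :: '2' :: '5' :: pvHex2 c.toNat)
        else result ++ [c])
      = (fun (result : List Char) (c : Char) =>
        result ++ (if PySem.Chars.isalpha c then ('%' :: '2' :: '5' :: pvHex2 c.toNat) else [c])) := by
    funext r c; split <;> rfl
  rw [hfold, PySem.List.foldl_append_eq_flatMap]
  simp only [List.nil_append]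
  congr 1
  apply List.flatMap_congr
  intro c hc
  rw [pvTable_get payload c hc]
  by_cases ha : PySem.Chars.isalpha c
  · simp only [ha, if_true, pvEnc]
    exact String.toList_ofList.symm
  · simp [ha]
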